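-- pv_equiv track=rewrite | github.com/nikhitshetty1905/hansard-quote-explorer | enhanced_historian.py | analyze_argument_structure
-- ===== SOURCE A (Python) =====
-- from typing import Optional, Dict, List
--
-- def analyze_argument_structure(quote: str) -> Dict[str, str]:
--     """Analyze the actual argumentative moves made"""
--
--     structure = {
--         'stance': 'neutral',
--         'argument_type': 'descriptive',
--         'evidence_type': 'none',
--         'target': 'general'
--     }
--
--     quote_lower = quote.lower()
--
--     # Determine stance based on language used
--     if any(word in quote_lower for word in ['threaten', 'danger', 'mischief', 'suffer', 'harm', 'against']):
--         structure['stance'] = 'critical'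
--     elif any(word in quote_lower for word in ['benefit', 'advantage', 'welcome', 'necessary', 'support']):
--         structure['stance'] = 'supportive'
--     elif any(word in quote_lower for word in ['however', 'but', 'although', 'while']):
--         structure['stance'] = 'balanced'
--
--     # Argument type
--     if any(phrase in quote_lower for phrase in ['we know that', 'statistics', 'evidence', 'fact']):
--         structure['argument_type'] = 'empirical'
--     elif any(phrase in quote_lower for phrase in ['ought', 'should', 'must', 'policy']):
--         structure['argument_type'] = 'normative'
--     elif any(phrase in quote_lower for phrase in ['if', 'would', 'could', 'might']):
--         structure['argument_type'] = 'hypothetical'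
--
--     # Evidence type
--     if 'gazette' in quote_lower or 'board of trade' in quote_lower or '%' in quote:
--         structure['evidence_type'] = 'official_statistics'
--     elif any(word in quote_lower for word in ['example', 'instance', 'case']):
--         structure['evidence_type'] = 'examples'
--     elif any(word in quote_lower for word in ['principle', 'general', 'always']):
--         structure['evidence_type'] = 'principles'
--
--     # Target of argument
--     if 'unskilled' in quote_lower:
--         structure['target'] = 'unskilled_workers'
--     elif 'skilled' in quote_lower or 'trade' in quote_lower:
--         structure['target'] = 'skilled_workers'
--     elif 'country' in quote_lower or 'nation' in quote_lower:
--         structure['target'] = 'national_interest'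
--
--     return structure
-- ===== SOURCE B (Python) =====
-- # Inverted-index rewrite: one flat keyword->(field,priority,value) index scanned in a
-- # single pass, keeping the minimum-priority hit per field, instead of per-field if/elif cascades.
--
-- FIELDS = [('stance', 'neutral'), ('argument_type', 'descriptive'),
--           ('evidence_type', 'none'), ('target', 'general')]
--
-- def _build_index():
--     table = [
--         ('stance', [(['threaten', 'danger', 'mischief', 'suffer', 'harm', 'against'], 'critical'),
--                     (['benefit', 'advantage', 'welcome', 'necessary', 'support'], 'supportive'),
--                     (['however', 'but', 'although', 'while'], 'balanced')]),
--         ('argument_type', [(['we know that', 'statistics', 'evidence', 'fact'], 'empirical'),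
--                            (['ought', 'should', 'must', 'policy'], 'normative'),
--                            (['if', 'would', 'could', 'might'], 'hypothetical')]),
--         ('evidence_type', [(['gazette', 'board of trade', '%'], 'official_statistics'),
--                            (['example', 'instance', 'case'], 'examples'),
--                            (['principle', 'general', 'always'], 'principles')]),
--         ('target', [(['unskilled'], 'unskilled_workers'),
--                     (['skilled', 'trade'], 'skilled_workers'),
--                     (['country', 'nation'], 'national_interest')]),
--     ]
--     index = {}
--     for field, rules in table:
--         for prio, (kws, value) in enumerate(rules, 1):
--             for kw in kws:
--                 index[kw] = (field, prio, value)
--     return index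
--
-- INDEX = _build_index()
--
-- def analyze_argument_structure(quote: str):
--     quote_lower = quote.lower()
--     best = {}  # field -> (priority, value); minimum priority wins, earlier keyword wins ties
--     for kw, (field, prio, value) in INDEX.items():
--         if kw in quote_lower:
--             cur = best.get(field)
--             if cur is None or prio < cur[0]:
--                 best[field] = (prio, value)
--     return {f: best[f][1] if f in best else d for f, d in FIELDS}
-- ===== Notes on version B (the rewrite author's own statement) =====
-- stated objective: alternative
-- what changed: Replaced the four per-field if/elif first-match cascades by a single pass over a flat inverted keyword->(field,priority,value) index that keeps the minimum-priority hit per field in a dict, then fills defaults.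
import Mathlib
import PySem

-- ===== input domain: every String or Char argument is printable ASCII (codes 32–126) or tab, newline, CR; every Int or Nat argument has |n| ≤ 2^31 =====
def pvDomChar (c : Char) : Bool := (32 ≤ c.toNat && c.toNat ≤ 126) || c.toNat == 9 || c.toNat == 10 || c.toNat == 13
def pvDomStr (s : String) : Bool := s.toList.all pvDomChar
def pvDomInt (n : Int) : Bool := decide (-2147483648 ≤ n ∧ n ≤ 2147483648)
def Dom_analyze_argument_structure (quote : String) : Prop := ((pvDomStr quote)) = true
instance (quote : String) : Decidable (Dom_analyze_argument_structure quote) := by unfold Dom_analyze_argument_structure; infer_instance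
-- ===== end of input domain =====

-- B replaces A's four per-field if/elif cascades by a single pass over a flat inverted
-- keyword->(field,priority,value) index keeping the minimum-priority hit per field
-- (objective: alternative); same return value for every input.

-- ===== PORT A =====
def analyze_argument_structure (quote : String) : List (String × String) :=
  let st : PySem.Dict String String := PySem.Dict.ofList
    [("stance", "neutral"), ("argument_type", "descriptive"),
     ("evidence_type", "none"), ("target", "general")]
  let ql := PySem.Str.lower quote
  let st :=
    if (["threaten", "danger", "mischief", "suffer", "harm", "against"] : List String).any (fun w => PySem.Str.isIn w ql) then
      st.insert "stance" "critical"
    else if (["benefit", "advantage", "welcome", "necessary", "support"] : List String).any (fun w => PySem.Str.isIn w ql) then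
      st.insert "stance" "supportive"
    else if (["however", "but", "although", "while"] : List String).any (fun w => PySem.Str.isIn w ql) then
      st.insert "stance" "balanced"
    else st
  let st :=
    if (["we know that", "statistics", "evidence", "fact"] : List String).any (fun w => PySem.Str.isIn w ql) then
      st.insert "argument_type" "empirical"
    else if (["ought", "should", "must", "policy"] : List String).any (fun w => PySem.Str.isIn w ql) then
      st.insert "argument_type" "normative"
    else if (["if", "would", "could", "might"] : List String).any (fun w => PySem.Str.isIn w ql) then
      st.insert "argument_type" "hypothetical"
    else st
  let st :=
    if PySem.Str.isIn "gazette" ql || PySem.Str.isIn "board of trade" ql || PySem.Str.isIn "%" quote then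
      st.insert "evidence_type" "official_statistics"
    else if (["example", "instance", "case"] : List String).any (fun w => PySem.Str.isIn w ql) then
      st.insert "evidence_type" "examples"
    else if (["principle", "general", "always"] : List String).any (fun w => PySem.Str.isIn w ql) then
      st.insert "evidence_type" "principles"
    else st
  let st :=
    if PySem.Str.isIn "unskilled" ql then
      st.insert "target" "unskilled_workers"
    else if PySem.Str.isIn "skilled" ql || PySem.Str.isIn "trade" ql then
      st.insert "target" "skilled_workers"
    else if PySem.Str.isIn "country" ql || PySem.Str.isIn "nation" ql then
      st.insert "target" "national_interest"
    else st
  st.items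

-- ===== PORT B =====
-- FIELDS of Source B
def pvFields : List (String × String) :=
  [("stance", "neutral"), ("argument_type", "descriptive"),
   ("evidence_type", "none"), ("target", "general")]

-- the `table` literal inside _build_index
def pvTable : List (String × List (List String × String)) :=
  [("stance",
     [(["threaten", "danger", "mischief", "suffer", "harm", "against"], "critical"),
      (["benefit", "advantage", "welcome", "necessary", "support"], "supportive"),
      (["however", "but", "although", "while"], "balanced")]),
   ("argument_type",
     [(["we know that", "statistics", "evidence", "fact"], "empirical"),
      (["ought", "should", "must", "policy"], "normative"),
      (["if", "would", "could", "might"], "hypothetical")]),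
   ("evidence_type",
     [(["gazette", "board of trade", "%"], "official_statistics"),
      (["example", "instance", "case"], "examples"),
      (["principle", "general", "always"], "principles")]),
   ("target",
     [(["unskilled"], "unskilled_workers"),
      (["skilled", "trade"], "skilled_workers"),
      (["country", "nation"], "national_interest")])]

-- _build_index(): nested loops filling the keyword -> (field, priority, value) dict
def pvBuildIndex : PySem.Dict String (String × Int × String) :=
  pvTable.foldl
    (fun idx fr =>
      (PySem.List.enumerate fr.2 1).foldl
        (fun idx pr =>
          pr.2.1.foldl (fun idx kw => idx.insert kw (fr.1, pr.1, pr.2.2)) idx)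
        idx)
    PySem.Dict.empty

-- loop body: if kw in quote_lower: cur = best.get(field); if cur is None or prio < cur[0]: best[field] = (prio, value)
def pvStep (ql : String) (best : PySem.Dict String (Int × String))
    (e : String × String × Int × String) : PySem.Dict String (Int × String) :=
  if PySem.Str.isIn e.1 ql then
    match best.get? e.2.1 with
    | none => best.insert e.2.1 (e.2.2.1, e.2.2.2)
    | some cur => if e.2.2.1 < cur.1 then best.insert e.2.1 (e.2.2.1, e.2.2.2) else best
  else best

def analyze_argument_structure_alt (quote : String) : List (String × String) :=
  let ql := PySem.Str.lower quote
  let best := pvBuildIndex.items.foldl (pvStep ql) PySem.Dict.empty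
  pvFields.map (fun f => (f.1, match best.get? f.1 with | some cur => cur.2 | none => f.2))

-- ===== PRECONDITION & SPEC =====
def Spec_analyze_argument_structure (quote : String) (out : List (String × String)) : Prop := out = analyze_argument_structure_alt quote
instance (quote : String) (out : List (String × String)) : Decidable (Spec_analyze_argument_structure quote out) := by unfold Spec_analyze_argument_structure; infer_instance

-- ===== CLAIM (what is proved, stated in full; the proofs are below) =====
def Claim_equal_analyze_argument_structure : Prop := ∀ (quote : String), Dom_analyze_argument_structure quote → Spec_analyze_argument_structure quote (analyze_argument_structure quote)

-- ===== LEMMAS AND PROOFS =====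

-- one rule's slice of the index: every keyword of the rule tagged (field, prio, value)
def pvG (f : String) (p : Int) (v : String) (kws : List String) :
    List (String × String × Int × String) :=
  kws.map (fun k => (k, f, p, v))

-- the index, flattened and grouped by field
def pvS : List (String × String × Int × String) :=
  pvG "stance" 1 "critical" ["threaten", "danger", "mischief", "suffer", "harm", "against"] ++
  pvG "stance" 2 "supportive" ["benefit", "advantage", "welcome", "necessary", "support"] ++
  pvG "stance" 3 "balanced" ["however", "but", "although", "while"]
def pvT : List (String × String × Int × String) :=
  pvG "argument_type" 1 "empirical" ["we know that", "statistics", "evidence", "fact"] ++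
  pvG "argument_type" 2 "normative" ["ought", "should", "must", "policy"] ++
  pvG "argument_type" 3 "hypothetical" ["if", "would", "could", "might"]
def pvE : List (String × String × Int × String) :=
  pvG "evidence_type" 1 "official_statistics" ["gazette", "board of trade", "%"] ++
  pvG "evidence_type" 2 "examples" ["example", "instance", "case"] ++
  pvG "evidence_type" 3 "principles" ["principle", "general", "always"]
def pvTg : List (String × String × Int × String) :=
  pvG "target" 1 "unskilled_workers" ["unskilled"] ++
  pvG "target" 2 "skilled_workers" ["skilled", "trade"] ++
  pvG "target" 3 "national_interest" ["country", "nation"]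
def pvFlat : List (String × String × Int × String) := pvS ++ (pvT ++ (pvE ++ pvTg))

set_option maxRecDepth 8192 in
theorem pvItems_eq : pvBuildIndex.items = pvFlat := by decide

theorem pvFoldl_step_ne (ql f : String) (l : List (String × String × Int × String))
    (best : PySem.Dict String (Int × String)) (h : ∀ e ∈ l, e.2.1 ≠ f) :
    (l.foldl (pvStep ql) best).get? f = best.get? f := by
  induction l generalizing best with
  | nil => rfl
  | cons e rest ih =>
    rw [List.foldl_cons, ih _ (fun e' he' => h e' (List.mem_cons_of_mem _ he'))]
    have hne : f ≠ e.2.1 := (h e List.mem_cons_self).symm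
    unfold pvStep
    by_cases hin : PySem.Chars.isIn e.1.toList ql.toList = true
    · cases hm : best.get? e.2.1 with
      | none => simp [hin, PySem.Dict.get?_insert, hne]
      | some cur =>
        by_cases hp : e.2.2.1 < cur.1
        · simp [hin, hp, PySem.Dict.get?_insert, hne]
        · simp [hin, hp]
    · simp [hin]

theorem pvFoldG_keep (ql f : String) (p : Int) (v : String) (kws : List String)
    (best : PySem.Dict String (Int × String)) (q : Int) (w : String)
    (h : best.get? f = some (q, w)) (hq : ¬ p < q) :
    (kws.foldl (fun b k => pvStep ql b (k, f, p, v)) best).get? f = some (q, w) := by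
  induction kws generalizing best with
  | nil => exact h
  | cons k rest ih =>
    have hstep : pvStep ql best (k, f, p, v) = best := by
      unfold pvStep
      by_cases hin : PySem.Chars.isIn k.toList ql.toList = true
      · simp [hin, h, hq]
      · simp [hin]
    rw [List.foldl_cons, hstep]
    exact ih best h

theorem pvFoldG_none (ql f : String) (p : Int) (v : String) (kws : List String)
    (best : PySem.Dict String (Int × String)) (h : best.get? f = none) :
    (kws.foldl (fun b k => pvStep ql b (k, f, p, v)) best).get? f =
      if kws.any (fun k => PySem.Str.isIn k ql) then some (p, v) else none := by
  induction kws generalizing best with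
  | nil => simpa using h
  | cons k rest ih =>
    by_cases hin : PySem.Chars.isIn k.toList ql.toList = true
    · have hstep : pvStep ql best (k, f, p, v) = best.insert f (p, v) := by
        unfold pvStep; simp [hin, h]
      rw [List.foldl_cons, hstep,
        pvFoldG_keep ql f p v rest _ p v (PySem.Dict.get?_insert_self _ _ _) (lt_irrefl p)]
      simp [hin]
    · have hstep : pvStep ql best (k, f, p, v) = best := by
        unfold pvStep; simp [hin]
      rw [List.foldl_cons, hstep, ih best h]
      simp [hin]

theorem pvCascade (ql f : String) (v1 v2 v3 : String) (k1 k2 k3 : List String)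
    (best : PySem.Dict String (Int × String)) (h : best.get? f = none) :
    ((pvG f 1 v1 k1 ++ pvG f 2 v2 k2 ++ pvG f 3 v3 k3).foldl (pvStep ql) best).get? f =
      if k1.any (fun k => PySem.Str.isIn k ql) then some (1, v1)
      else if k2.any (fun k => PySem.Str.isIn k ql) then some (2, v2)
      else if k3.any (fun k => PySem.Str.isIn k ql) then some (3, v3)
      else none := by
  simp only [pvG, List.foldl_append, List.foldl_map]
  by_cases a1 : k1.any (fun k => PySem.Str.isIn k ql) = true
  · have h1 : (k1.foldl (fun b k => pvStep ql b (k, f, 1, v1)) best).get? f = some (1, v1) := by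
      rw [pvFoldG_none ql f 1 v1 k1 best h, if_pos a1]
    have h2 := pvFoldG_keep ql f 2 v2 k2 _ 1 v1 h1 (by norm_num)
    have h3 := pvFoldG_keep ql f 3 v3 k3 _ 1 v1 h2 (by norm_num)
    rw [h3, if_pos a1]
  · have h1 : (k1.foldl (fun b k => pvStep ql b (k, f, 1, v1)) best).get? f = none := by
      rw [pvFoldG_none ql f 1 v1 k1 best h, if_neg a1]
    by_cases a2 : k2.any (fun k => PySem.Str.isIn k ql) = true
    · have h2 : (k2.foldl (fun b k => pvStep ql b (k, f, 2, v2))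
          (k1.foldl (fun b k => pvStep ql b (k, f, 1, v1)) best)).get? f = some (2, v2) := by
        rw [pvFoldG_none ql f 2 v2 k2 _ h1, if_pos a2]
      have h3 := pvFoldG_keep ql f 3 v3 k3 _ 2 v2 h2 (by norm_num)
      rw [h3, if_neg a1, if_pos a2]
    · have h2 : (k2.foldl (fun b k => pvStep ql b (k, f, 2, v2))
          (k1.foldl (fun b k => pvStep ql b (k, f, 1, v1)) best)).get? f = none := by
        rw [pvFoldG_none ql f 2 v2 k2 _ h1, if_neg a2]
      rw [pvFoldG_none ql f 3 v3 k3 _ h2, if_neg a1, if_neg a2]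

theorem pvBest_stance (ql : String) :
    (pvFlat.foldl (pvStep ql) PySem.Dict.empty).get? "stance" =
      if (["threaten", "danger", "mischief", "suffer", "harm", "against"] : List String).any (fun k => PySem.Str.isIn k ql) then some (1, "critical")
      else if (["benefit", "advantage", "welcome", "necessary", "support"] : List String).any (fun k => PySem.Str.isIn k ql) then some (2, "supportive")
      else if (["however", "but", "although", "while"] : List String).any (fun k => PySem.Str.isIn k ql) then some (3, "balanced")
      else none := by
  unfold pvFlat
  rw [List.foldl_append,
    pvFoldl_step_ne ql "stance" (pvT ++ (pvE ++ pvTg)) _ (by decide)]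
  unfold pvS
  exact pvCascade ql "stance" _ _ _ _ _ _ PySem.Dict.empty (by simp)

theorem pvBest_argtype (ql : String) :
    (pvFlat.foldl (pvStep ql) PySem.Dict.empty).get? "argument_type" =
      if (["we know that", "statistics", "evidence", "fact"] : List String).any (fun k => PySem.Str.isIn k ql) then some (1, "empirical")
      else if (["ought", "should", "must", "policy"] : List String).any (fun k => PySem.Str.isIn k ql) then some (2, "normative")
      else if (["if", "would", "could", "might"] : List String).any (fun k => PySem.Str.isIn k ql) then some (3, "hypothetical")
      else none := by
  unfold pvFlat
  rw [List.foldl_append, List.foldl_append,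
    pvFoldl_step_ne ql "argument_type" (pvE ++ pvTg) _ (by decide)]
  have h0 : (List.foldl (pvStep ql) PySem.Dict.empty pvS).get? "argument_type" = none := by
    rw [pvFoldl_step_ne ql "argument_type" pvS _ (by decide)]; simp
  unfold pvT
  exact pvCascade ql "argument_type" _ _ _ _ _ _ _ h0

theorem pvBest_ev (ql : String) :
    (pvFlat.foldl (pvStep ql) PySem.Dict.empty).get? "evidence_type" =
      if (["gazette", "board of trade", "%"] : List String).any (fun k => PySem.Str.isIn k ql) then some (1, "official_statistics")
      else if (["example", "instance", "case"] : List String).any (fun k => PySem.Str.isIn k ql) then some (2, "examples")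
      else if (["principle", "general", "always"] : List String).any (fun k => PySem.Str.isIn k ql) then some (3, "principles")
      else none := by
  unfold pvFlat
  rw [List.foldl_append, List.foldl_append, List.foldl_append,
    pvFoldl_step_ne ql "evidence_type" pvTg _ (by decide)]
  have h0 : (List.foldl (pvStep ql) (List.foldl (pvStep ql) PySem.Dict.empty pvS) pvT).get? "evidence_type" = none := by
    rw [pvFoldl_step_ne ql "evidence_type" pvT _ (by decide),
      pvFoldl_step_ne ql "evidence_type" pvS _ (by decide)]
    simp
  unfold pvE
  exact pvCascade ql "evidence_type" _ _ _ _ _ _ _ h0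

theorem pvBest_target (ql : String) :
    (pvFlat.foldl (pvStep ql) PySem.Dict.empty).get? "target" =
      if (["unskilled"] : List String).any (fun k => PySem.Str.isIn k ql) then some (1, "unskilled_workers")
      else if (["skilled", "trade"] : List String).any (fun k => PySem.Str.isIn k ql) then some (2, "skilled_workers")
      else if (["country", "nation"] : List String).any (fun k => PySem.Str.isIn k ql) then some (3, "national_interest")
      else none := by
  unfold pvFlat
  rw [List.foldl_append, List.foldl_append, List.foldl_append]
  have h0 : (List.foldl (pvStep ql) (List.foldl (pvStep ql) (List.foldl (pvStep ql) PySem.Dict.empty pvS) pvT) pvE).get? "target" = none := by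
    rw [pvFoldl_step_ne ql "target" pvE _ (by decide),
      pvFoldl_step_ne ql "target" pvT _ (by decide),
      pvFoldl_step_ne ql "target" pvS _ (by decide)]
    simp
  unfold pvTg
  exact pvCascade ql "target" _ _ _ _ _ _ _ h0

-- lowercasing only moves A–Z, so nothing else maps onto '%'
theorem pvLowerChar_percent (c : Char) : (PySem.Chars.lowerChar c = '%') ↔ c = '%' := by
  have hp : ('%' : Char).toNat = 37 := by decide
  unfold PySem.Chars.lowerChar PySem.Chars.isupper
  split_ifs with h
  · simp only [Bool.and_eq_true, decide_eq_true_eq, Char.le_def] at h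
    have h1 : 65 ≤ c.toNat := h.1
    have h2 : c.toNat ≤ 90 := h.2
    constructor
    · intro he
      have h3 := congrArg Char.toNat he
      rw [show (Char.ofNat (c.toNat + 32)).toNat = c.toNat + 32 from by
        unfold Char.ofNat
        split
        · rfl
        · next hn => exact absurd (Or.inl (by omega) : Nat.isValidChar (c.toNat + 32)) hn] at h3
      omega
    · intro he; subst he; omega
  · exact Iff.rfl

theorem pvIsIn_singleton_iff_mem (a : Char) (l : List Char) :
    PySem.Chars.isIn [a] l = true ↔ a ∈ l := by
  rw [PySem.Chars.isIn_iff_infix]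
  constructor
  · intro h; exact h.subset (by simp)
  · intro h
    obtain ⟨p, q, rfl⟩ := List.append_of_mem h
    exact ⟨p, q, by simp⟩

-- '%' in quote  =  '%' in quote.lower()
theorem pvPercent_lower (s : String) :
    PySem.Str.isIn "%" s = PySem.Str.isIn "%" (PySem.Str.lower s) := by
  have h : ∀ t : List Char, PySem.Chars.isIn ['%'] t = true ↔ '%' ∈ t :=
    fun t => pvIsIn_singleton_iff_mem '%' t
  have hb : PySem.Chars.isIn ['%'] s.toList = PySem.Chars.isIn ['%'] (PySem.Chars.lower s.toList) := by
    rw [Bool.eq_iff_iff, h, h, PySem.Chars.lower, List.mem_map]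
    constructor
    · intro hm; exact ⟨'%', hm, by decide⟩
    · rintro ⟨c, hc, hcp⟩
      rwa [(pvLowerChar_percent c).mp hcp] at hc
  simpa [PySem.Str.isIn, PySem.Str.toList_lower] using hb

-- ===== VERDICT (by name: the statement is the Claim_ definition above) =====
theorem analyze_argument_structure_spec : Claim_equal_analyze_argument_structure := by
  intro quote _
  unfold Spec_analyze_argument_structure analyze_argument_structure analyze_argument_structure_alt
    pvFields
  dsimp only
  rw [pvPercent_lower, pvItems_eq]
  simp only [List.map]
  rw [pvBest_stance, pvBest_argtype, pvBest_ev, pvBest_target]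
  simp only [List.any_cons, List.any_nil, Bool.or_false, Bool.or_assoc]
  generalize PySem.Str.lower quote = ql
  generalize (PySem.Str.isIn "threaten" ql || (PySem.Str.isIn "danger" ql || (PySem.Str.isIn "mischief" ql || (PySem.Str.isIn "suffer" ql || (PySem.Str.isIn "harm" ql || PySem.Str.isIn "against" ql))))) = b1
  generalize (PySem.Str.isIn "benefit" ql || (PySem.Str.isIn "advantage" ql || (PySem.Str.isIn "welcome" ql || (PySem.Str.isIn "necessary" ql || PySem.Str.isIn "support" ql)))) = b2
  generalize (PySem.Str.isIn "however" ql || (PySem.Str.isIn "but" ql || (PySem.Str.isIn "although" ql || PySem.Str.isIn "while" ql))) = b3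
  generalize (PySem.Str.isIn "we know that" ql || (PySem.Str.isIn "statistics" ql || (PySem.Str.isIn "evidence" ql || PySem.Str.isIn "fact" ql))) = b4
  generalize (PySem.Str.isIn "ought" ql || (PySem.Str.isIn "should" ql || (PySem.Str.isIn "must" ql || PySem.Str.isIn "policy" ql))) = b5
  generalize (PySem.Str.isIn "if" ql || (PySem.Str.isIn "would" ql || (PySem.Str.isIn "could" ql || PySem.Str.isIn "might" ql))) = b6
  generalize (PySem.Str.isIn "gazette" ql || (PySem.Str.isIn "board of trade" ql || PySem.Str.isIn "%" ql)) = b7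
  generalize (PySem.Str.isIn "example" ql || (PySem.Str.isIn "instance" ql || PySem.Str.isIn "case" ql)) = b8
  generalize (PySem.Str.isIn "principle" ql || (PySem.Str.isIn "general" ql || PySem.Str.isIn "always" ql)) = b9
  generalize PySem.Str.isIn "unskilled" ql = b10
  generalize (PySem.Str.isIn "skilled" ql || PySem.Str.isIn "trade" ql) = b11
  generalize (PySem.Str.isIn "country" ql || PySem.Str.isIn "nation" ql) = b12
  revert b1 b2 b3 b4 b5 b6 b7 b8 b9 b10 b11 b12
  decide
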